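-- pv_equiv track=rewrite | github.com/Pranjal-Patil-Pers/spectral_analysis | notebooks/experiment14.py | build_feature_spans
-- ===== SOURCE A (Python) =====
-- def build_feature_spans(feature_meta: list[dict[str, int]]) -> list[dict[str, int]]:
--     spans: list[dict[str, int]] = []
--     start = 0
--     for meta in feature_meta:
--         width = int(meta.get("flat_dim", 0))
--         end = start + width
--         spans.append(
--             {
--                 "window_size": int(meta["window_size"]),
--                 "start": int(start),
--                 "end": int(end),
--             }
--         )
--         start = end
--     return spans
-- ===== SOURCE B (Python) =====
-- from itertools import accumulate
--
-- def build_feature_spans(feature_meta: list[dict[str, int]]) -> list[dict[str, int]]: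
--     # read flat_dim before window_size, in order, so exceptions fire as in A
--     pairs = [(int(m.get("flat_dim", 0)), int(m["window_size"])) for m in feature_meta]
--     ends = list(accumulate(w for w, _ in pairs))
--     starts = [0] + ends[:-1]
--     return [
--         {"window_size": ws, "start": s, "end": e}
--         for s, (e, (_, ws)) in zip(starts, zip(ends, pairs))
--     ]
-- ===== Notes on version B (the rewrite author's own statement) =====
-- stated objective: alternative
-- what changed: Replaces A's explicit running-sum accumulator loop with a prefix-sum table (itertools.accumulate) plus a zip/mapping pass over starts, ends and window sizes.
import Mathlib
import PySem

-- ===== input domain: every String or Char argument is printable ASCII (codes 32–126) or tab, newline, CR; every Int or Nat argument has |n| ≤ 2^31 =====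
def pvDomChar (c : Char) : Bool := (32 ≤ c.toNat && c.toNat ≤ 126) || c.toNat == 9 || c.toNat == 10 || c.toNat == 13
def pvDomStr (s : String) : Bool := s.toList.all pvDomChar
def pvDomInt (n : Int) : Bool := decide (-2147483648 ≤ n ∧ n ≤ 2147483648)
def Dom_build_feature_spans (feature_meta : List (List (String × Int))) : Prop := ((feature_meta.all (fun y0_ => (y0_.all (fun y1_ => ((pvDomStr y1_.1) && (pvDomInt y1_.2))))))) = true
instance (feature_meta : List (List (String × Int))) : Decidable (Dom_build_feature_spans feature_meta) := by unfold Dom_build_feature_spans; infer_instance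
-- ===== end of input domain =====

-- B replaces A's running-sum accumulator loop with a prefix-sum (accumulate) table zipped into the output: an alternative decomposition, same cost.


-- dict lookup on the association-list encoding: first match (Python dict semantics)
def pvLookup? (d : List (String × Int)) (k : String) : Option Int :=
  (d.find? (fun p => p.1 == k)).map (·.2)

def pvGetD (d : List (String × Int)) (k : String) (dflt : Int) : Int :=
  (pvLookup? d k).getD dflt

-- ===== PORT A =====
-- A's for-loop with running `start`, transcribed as structural recursion over the same state
def buildA_loop (start : Int) : List (List (String × Int)) → List (List (String × Int))
  | [] => []
  | m :: rest =>
    let width := pvGetD m "flat_dim" 0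
    let endv := start + width
    [("window_size", (pvLookup? m "window_size").getD 0), ("start", start), ("end", endv)]
      :: buildA_loop endv rest

def build_feature_spans (feature_meta : List (List (String × Int))) : List (List (String × Int)) :=
  buildA_loop 0 feature_meta

-- ===== PORT B =====
-- port of itertools.accumulate (running sums from offset s)
def pvAccum (s : Int) : List Int → List Int
  | [] => []
  | w :: ws => (s + w) :: pvAccum (s + w) ws

def build_feature_spans_alt (feature_meta : List (List (String × Int))) : List (List (String × Int)) :=
  let pairs := feature_meta.map (fun m => (pvGetD m "flat_dim" 0, (pvLookup? m "window_size").getD 0))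
  let ends := pvAccum 0 (pairs.map (·.1))   -- itertools.accumulate over the widths
  let starts := 0 :: ends.dropLast
  (starts.zip (ends.zip pairs)).map
    (fun p => [("window_size", p.2.2.2), ("start", p.1), ("end", p.2.1)])

-- ===== PRECONDITION & SPEC =====
-- A raises KeyError when some meta lacks "window_size"; those inputs are excluded.
def Pre_build_feature_spans (feature_meta : List (List (String × Int))) : Prop :=
  ∀ m ∈ feature_meta, (pvLookup? m "window_size").isSome = true
instance (feature_meta : List (List (String × Int))) : Decidable (Pre_build_feature_spans feature_meta) := by unfold Pre_build_feature_spans; infer_instance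

def pvWitness_build_feature_spans : (List (List (String × Int))) :=
  [[("flat_dim", 3), ("window_size", 5)], [("window_size", 2)]]

def Spec_build_feature_spans (feature_meta : List (List (String × Int))) (out : List (List (String × Int))) : Prop := out = build_feature_spans_alt feature_meta
instance (feature_meta : List (List (String × Int))) (out : List (List (String × Int))) : Decidable (Spec_build_feature_spans feature_meta out) := by unfold Spec_build_feature_spans; infer_instance

-- ===== CLAIM (what is proved, stated in full; the proofs are below) =====
def Claim_equal_build_feature_spans : Prop := ∀ (feature_meta : List (List (String × Int))), Dom_build_feature_spans feature_meta → Pre_build_feature_spans feature_meta → Spec_build_feature_spans feature_meta (build_feature_spans feature_meta)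

-- ===== LEMMAS AND PROOFS =====

-- B's pipeline, generalized over the starting offset
def altFrom (s : Int) (fm : List (List (String × Int))) : List (List (String × Int)) :=
  let pairs := fm.map (fun m => (pvGetD m "flat_dim" 0, (pvLookup? m "window_size").getD 0))
  let ends := pvAccum s (pairs.map (·.1))
  let starts := s :: ends.dropLast
  (starts.zip (ends.zip pairs)).map
    (fun p => [("window_size", p.2.2.2), ("start", p.1), ("end", p.2.1)])

-- moving dropLast inside the cons is harmless once zipped against the (one-shorter) tail
lemma dropLast_cons_zip {a : Type} (x : Int) (l : List Int) (l2 : List a) :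
    ((x :: l).dropLast).zip (l.zip l2) = (x :: l.dropLast).zip (l.zip l2) := by
  cases l with
  | nil => simp
  | cons y l' => simp

-- one step of the starts/ends/pairs zip: peel the head and shift the start offset
lemma zip_span_step {a : Type} (x y : Int) (l : List Int) (p : a) (ps : List a) :
    (x :: (y :: l).dropLast).zip ((y :: l).zip (p :: ps))
      = (x, (y, p)) :: (y :: l.dropLast).zip (l.zip ps) := by
  cases l with
  | nil => simp
  | cons z l' => simp

lemma buildA_eq_altFrom (fm : List (List (String × Int))) :
    ∀ s : Int, buildA_loop s fm = altFrom s fm := by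
  induction fm with
  | nil => intro s; rfl
  | cons m rest ih =>
    intro s
    cases rest with
    | nil =>
      simp [buildA_loop, altFrom, pvAccum]
    | cons m2 rest2 =>
      have h := ih (s + pvGetD m "flat_dim" 0)
      simp only [buildA_loop, altFrom, List.map_cons, pvAccum] at *
      rw [h]
      rw [zip_span_step]
      simp [List.map_map]
      rw [dropLast_cons_zip]

-- ===== VERDICT (by name: the statement is the Claim_ definition above) =====
theorem build_feature_spans_spec : Claim_equal_build_feature_spans := by
  intro fm _ _
  unfold Spec_build_feature_spans build_feature_spans build_feature_spans_alt
  simpa [altFrom] using buildA_eq_altFrom fm 0
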